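-- pv_equiv track=rewrite | github.com/hyeri-woo/algorithm | python/binary_search/3649_로봇프로젝트/index.py | find_lego_pair
-- ===== SOURCE A (Python) =====
-- def find_lego_pair(x, n, pieces):
--     pieces.sort()
--
--     left = 0
--     right = n - 1
--     best_pair = None
--
--     while left < right:
--         curr_sum = pieces[left] + pieces[right]
--         if curr_sum == x:
--             if best_pair is None or abs(pieces[right] - pieces[left]) > abs(best_pair[1] - best_pair[0]):
--                 best_pair = (pieces[left], pieces[right])
--             left += 1
--             right -= 1
--         elif curr_sum < x:
--             left += 1
--         else:
--             right -= 1
--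
--     if best_pair:
--         return f"yes {best_pair[0]} {best_pair[1]}"
--     else:
--         return "danger"
-- ===== SOURCE B (Python) =====
-- def find_lego_pair(x, n, pieces):
--     pieces.sort()
--     best = None
--     seen = set()
--     for j in range(min(n, len(pieces))):
--         v = pieces[j]
--         if x - v in seen:
--             best = (x - v, v)
--         seen.add(v)
--     if best:
--         return f"yes {best[0]} {best[1]}"
--     return "danger"
-- ===== Notes on version B (the rewrite author's own statement) =====
-- stated objective: simpler
-- what changed: Replaces the two-pointer while-loop over the sorted list by a single forward scan with a seen-set that records, for each value v, the pair (x-v, v) when its complement was already seen; because the scan is increasing the last recorded pair is exactly the maximum-difference pair A keeps.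
import Mathlib
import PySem

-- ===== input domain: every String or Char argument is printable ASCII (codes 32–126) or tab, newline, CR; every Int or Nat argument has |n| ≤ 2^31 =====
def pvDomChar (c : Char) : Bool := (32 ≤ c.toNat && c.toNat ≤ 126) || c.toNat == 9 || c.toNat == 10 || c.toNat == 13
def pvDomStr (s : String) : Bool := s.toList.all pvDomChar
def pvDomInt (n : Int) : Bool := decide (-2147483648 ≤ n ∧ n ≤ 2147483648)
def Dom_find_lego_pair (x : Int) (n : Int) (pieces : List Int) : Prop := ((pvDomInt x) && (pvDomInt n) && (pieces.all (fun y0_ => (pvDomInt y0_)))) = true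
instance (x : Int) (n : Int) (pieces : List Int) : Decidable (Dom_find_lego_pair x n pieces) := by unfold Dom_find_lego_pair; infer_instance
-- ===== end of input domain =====

-- B replaces A's two-pointer while-loop by a one-pass seen-set scan over the sorted prefix (objective: simpler).
-- Both A and B sort `pieces` in place (the same observable mutation); the equivalence proved is about the return value.

-- ===== PORT A =====
-- while left < right: two-pointer scan keeping the first (= max-difference) pair summing to x
def aLoop (x : Int) (s : List Int) (l r : Int) (best : Option (Int × Int)) : String :=
  if _h : l < r then
    match PySem.List.pyGet? s l, PySem.List.pyGet? s r with
    | some a, some b =>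
      if a + b = x then
        let best' : Option (Int × Int) :=
          match best with
          | none => some (a, b)
          | some (p, q) => if |b - a| > |q - p| then some (a, b) else some (p, q)
        aLoop x s (l + 1) (r - 1) best'
      else if a + b < x then
        aLoop x s (l + 1) r best
      else
        aLoop x s l (r - 1) best
    | _, _ => "danger"  -- pieces[left] / pieces[right] IndexError in Python: outside Pre_
  else
    match best with
    | some (a, b) => "yes " ++ PySem.Int.toStr a ++ " " ++ PySem.Int.toStr b
    | none => "danger"
termination_by (r - l).toNat
decreasing_by all_goals omega

def find_lego_pair (x : Int) (n : Int) (pieces : List Int) : String :=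
  aLoop x (PySem.List.sorted pieces (fun v => v) false) 0 (n - 1) none

-- ===== PORT B =====
-- one step of B's scan: state = (best pair so far, set of values seen so far)
def bStep (x : Int) (st : Option (Int × Int) × PySem.Set Int) (v : Int) : Option (Int × Int) × PySem.Set Int :=
  (if PySem.Set.contains st.2 (x - v) then some (x - v, v) else st.1, PySem.Set.add st.2 v)

def find_lego_pair_alt (x : Int) (n : Int) (pieces : List Int) : String :=
  let s := PySem.List.sorted pieces (fun v => v) false
  let res := (PySem.List.pyRange 0 (min n (s.length : Int)) 1).foldl
      (fun st j => bStep x st (PySem.List.pyGetD s j 0)) (none, PySem.Set.empty)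
  match res.1 with
  | some (a, b) => "yes " ++ PySem.Int.toStr a ++ " " ++ PySem.Int.toStr b
  | none => "danger"

-- ===== PRECONDITION & SPEC =====
-- Pre_ excludes exactly the inputs where Python A raises IndexError: n ≥ 2 together with n > len(pieces).
def Pre_find_lego_pair (x : Int) (n : Int) (pieces : List Int) : Prop :=
  n ≤ (pieces.length : Int) ∨ n < 2
instance (x : Int) (n : Int) (pieces : List Int) : Decidable (Pre_find_lego_pair x n pieces) := by unfold Pre_find_lego_pair; infer_instance

def pvWitness_find_lego_pair : Int × Int × List Int := (10, 4, [2, 5, 8, 3])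

def Spec_find_lego_pair (x : Int) (n : Int) (pieces : List Int) (out : String) : Prop := out = find_lego_pair_alt x n pieces
instance (x : Int) (n : Int) (pieces : List Int) (out : String) : Decidable (Spec_find_lego_pair x n pieces out) := by unfold Spec_find_lego_pair; infer_instance

-- ===== CLAIM (what is proved, stated in full; the proofs are below) =====
def Claim_equal_find_lego_pair : Prop := ∀ (x : Int) (n : Int) (pieces : List Int), Dom_find_lego_pair x n pieces → Pre_find_lego_pair x n pieces → Spec_find_lego_pair x n pieces (find_lego_pair x n pieces)

-- ===== LEMMAS AND PROOFS =====

-- `pvLp x rev` is the pair B's scan ends with, computed on the REVERSED scanned list: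
-- the last scanned value v whose complement x - v occurred before it, kept as the pair (x - v, v).
def pvLp (x : Int) : List Int → Option (Int × Int)
  | [] => none
  | v :: rest => if (x - v) ∈ rest then some (x - v, v) else pvLp x rest

lemma bfold_spec (x : Int) (t : List Int) : ∀ (p : List Int),
    t.foldl (bStep x) (pvLp x p.reverse, PySem.Set.ofList p)
      = (pvLp x (p ++ t).reverse, PySem.Set.ofList (p ++ t)) := by
  induction t with
  | nil => intro p; simp
  | cons v t' ih =>
    intro p
    have h1 : bStep x (pvLp x p.reverse, PySem.Set.ofList p) v
        = (pvLp x (p ++ [v]).reverse, PySem.Set.ofList (p ++ [v])) := by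
      have hc : PySem.Set.contains (PySem.Set.ofList p) (x - v)
          = decide ((x - v) ∈ p.reverse) := by
        simp [PySem.Set.contains, PySem.Set.mem_ofList]
      have hadd : PySem.Set.add (PySem.Set.ofList p) v = PySem.Set.ofList (p ++ [v]) := by
        simp [PySem.Set.ofList_eq_foldl]
      simp only [bStep, hc, hadd, List.reverse_append, List.reverse_cons, List.reverse_nil,
        List.nil_append, List.singleton_append, pvLp]
      by_cases hm : (x - v) ∈ p.reverse <;> simp [hm]
    have := ih (p ++ [v])
    simp only [List.foldl_cons, h1]
    rw [this]
    simp

lemma pyGet?_toNat (xs : List Int) (i : Int) (h : 0 ≤ i) (h2 : i.toNat < xs.length) :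
    PySem.List.pyGet? xs i = some (xs.getD i.toNat 0) := by
  simp [PySem.List.pyGet?, PySem.List.pyIdx?, h, show i < (xs.length : Int) by omega,
    List.getD_eq_getElem _ _ h2]

lemma fold_range_take (x : Int) (s : List Int) (N : Nat) (hN : N ≤ s.length) :
    (PySem.List.pyRange 0 (N : Int) 1).foldl
        (fun st j => bStep x st (PySem.List.pyGetD s j 0)) (none, PySem.Set.empty)
      = (s.take N).foldl (bStep x) (none, PySem.Set.empty) := by
  induction N with
  | zero => simp [PySem.List.pyRange_one_eq_nil]
  | succ k ih =>
    have hk : k ≤ s.length := by omega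
    have hrange : PySem.List.pyRange 0 ((k : Int) + 1) 1
        = PySem.List.pyRange 0 (k : Int) 1 ++ [(k : Int)] :=
      PySem.List.pyRange_one_succ_right (by positivity)
    have hget : PySem.List.pyGetD s ((k : Int)) 0 = s.getD k 0 := by
      simp [PySem.List.pyGetD_natCast]
    have htake : s.take (k + 1) = s.take k ++ [s.getD k 0] := by
      have hlt : k < s.length := by omega
      rw [List.take_add_one]
      simp [List.getElem?_eq_getElem hlt, List.getD_eq_getElem _ _ hlt]
    push_cast
    rw [hrange, List.foldl_append, htake, List.foldl_append, ih hk]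
    simp [hget]

lemma getD_append_left (p q : List Int) (i : Nat) (h : i < p.length) :
    (p ++ q).getD i 0 = p.getD i 0 := by
  rw [List.getD_eq_getElem _ _ (by simp; omega), List.getD_eq_getElem _ _ h,
    List.getElem_append_left h]

lemma getD_append_self (p : List Int) (v : Int) :
    (p ++ [v]).getD p.length 0 = v := by
  rw [List.getD_eq_getElem _ _ (by simp)]
  simp

lemma lp_eq_none (x : Int) (t : List Int)
    (h : ∀ i j : Nat, i < j → j < t.length → t.getD i 0 + t.getD j 0 ≠ x) :
    pvLp x t.reverse = none := by
  induction t using List.reverseRecOn with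
  | nil => rfl
  | append_singleton p v ih =>
    simp only [List.reverse_append, List.reverse_cons, List.reverse_nil, List.nil_append,
      List.singleton_append, pvLp]
    have hnm : (x - v) ∉ p.reverse := by
      intro hm
      rw [List.mem_reverse] at hm
      obtain ⟨i, hi, hpi⟩ := List.getElem_of_mem hm
      exact h i p.length (by omega) (by simp)
        (by rw [getD_append_left _ _ _ hi, getD_append_self,
              List.getD_eq_getElem _ _ hi, hpi]; omega)
    simp only [hnm, if_false]
    refine ih (fun i j hij hj hx => h i j hij (by simp; omega) ?_)
    rw [getD_append_left _ _ _ (by omega), getD_append_left _ _ _ hj]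
    exact hx

lemma lp_eq_some_of_last (x : Int) (t : List Int) (J : Nat) (hJ : J < t.length)
    (hgood : ∃ i, i < J ∧ t.getD i 0 + t.getD J 0 = x)
    (hlast : ∀ j, J < j → j < t.length → ∀ i, i < j → t.getD i 0 + t.getD j 0 ≠ x) :
    pvLp x t.reverse = some (x - t.getD J 0, t.getD J 0) := by
  induction t using List.reverseRecOn with
  | nil => simp at hJ
  | append_singleton p v ih =>
    simp only [List.reverse_append, List.reverse_cons, List.reverse_nil, List.nil_append,
      List.singleton_append, pvLp]
    rcases Nat.lt_or_ge J p.length with hJp | hJp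
    · -- J inside p: the appended last element v has no earlier partner
      have hnm : (x - v) ∉ p.reverse := by
        intro hm
        rw [List.mem_reverse] at hm
        obtain ⟨i, hi, hpi⟩ := List.getElem_of_mem hm
        exact hlast p.length (by omega) (by simp) i hi
          (by rw [getD_append_left _ _ _ hi, getD_append_self,
                List.getD_eq_getElem _ _ hi, hpi]; omega)
      simp only [hnm, if_false]
      rw [getD_append_left _ _ _ hJp] at hgood ⊢
      refine ih hJp ?_ ?_
      · obtain ⟨i, hiJ, hx⟩ := hgood
        exact ⟨i, hiJ, by rwa [getD_append_left _ _ _ (by omega)] at hx⟩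
      · intro j hJj hjp i hij
        have := hlast j hJj (by simp; omega) i (by omega)
        rwa [getD_append_left _ _ _ (by omega), getD_append_left _ _ _ hjp] at this
    · -- J names the appended last element
      have hJe : J = p.length := by simp at hJ; omega
      subst hJe
      have hm : (x - v) ∈ p.reverse := by
        obtain ⟨i, hiJ, hx⟩ := hgood
        rw [getD_append_left _ _ _ hiJ, getD_append_self] at hx
        rw [List.mem_reverse]
        have : p.getD i 0 = x - v := by omega
        rw [List.getD_eq_getElem _ _ hiJ] at this
        rw [← this]; exact List.getElem_mem _
      rw [getD_append_self]
      simp [hm]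

lemma sorted_getD_mono (t : List Int) (hs : t.Pairwise (· ≤ ·)) (i j : Nat)
    (hij : i ≤ j) (hj : j < t.length) : t.getD i 0 ≤ t.getD j 0 := by
  rcases Nat.lt_or_ge i j with h | h
  · rw [List.getD_eq_getElem _ _ (by omega), List.getD_eq_getElem _ _ hj]
    exact List.pairwise_iff_getElem.mp hs i j (by omega) hj h
  · have : i = j := by omega
    subst this; rfl

lemma getD_take (s : List Int) (N i : Nat) (h : i < N) (h2 : N ≤ s.length) :
    (s.take N).getD i 0 = s.getD i 0 := by
  rw [List.getD_eq_getElem _ _ (by simp; omega), List.getD_eq_getElem _ _ (by omega)]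
  simp

-- A's loop only reads indices in [0, r]: it computes the same on the prefix s.take N.
lemma aLoop_take (x : Int) (s : List Int) (N : Nat) (hNs : N ≤ s.length) :
    ∀ (fuel : Nat) (l r : Int) (best : Option (Int × Int)), (r - l).toNat ≤ fuel →
    0 ≤ l → r < (N : Int) →
    aLoop x s l r best = aLoop x (s.take N) l r best := by
  intro fuel
  induction fuel with
  | zero =>
    intro l r best hf h0 hr
    have hlr : ¬ l < r := by omega
    conv_lhs => rw [aLoop.eq_def]
    conv_rhs => rw [aLoop.eq_def]
    simp only [dif_neg hlr]
  | succ k ih =>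
    intro l r best hf h0 hr
    by_cases hlr : l < r
    case neg =>
      conv_lhs => rw [aLoop.eq_def]
      conv_rhs => rw [aLoop.eq_def]
      simp only [dif_neg hlr]
    case pos =>
      have hln : l.toNat < N := by omega
      have hrn : r.toNat < N := by omega
      have hga := pyGet?_toNat s l h0 (by omega)
      have hgb := pyGet?_toNat s r (by omega) (by omega)
      have hga' := pyGet?_toNat (s.take N) l h0 (by simp; omega)
      have hgb' := pyGet?_toNat (s.take N) r (by omega) (by simp; omega)
      rw [getD_take s N l.toNat hln hNs] at hga'
      rw [getD_take s N r.toNat hrn hNs] at hgb'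
      conv_lhs => rw [aLoop.eq_def]
      conv_rhs => rw [aLoop.eq_def]
      simp only [dif_pos hlr, hga, hgb, hga', hgb']
      split_ifs with h1 h2
      · exact ih (l + 1) (r - 1) _ (by omega) (by omega) (by omega)
      · exact ih (l + 1) r best (by omega) (by omega) hr
      · exact ih l (r - 1) best (by omega) h0 (by omega)

-- The heart of the equivalence: on a sorted list, A's two-pointer loop ends with exactly
-- the pair pvLp (B's scan) describes.
lemma aLoop_main (x : Int) (t : List Int) (hs : t.Pairwise (· ≤ ·)) :
    ∀ (fuel : Nat) (l r : Int) (best : Option (Int × Int)), (r - l).toNat ≤ fuel →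
    0 ≤ l → l < (t.length : Int) → 0 ≤ r → r < (t.length : Int) →
    (best = none → ∀ i j : Nat, i < j → j < t.length → t.getD i 0 + t.getD j 0 = x →
        (l ≤ (i : Int) ∧ (j : Int) ≤ r)) →
    (∀ a b, best = some (a, b) → pvLp x t.reverse = some (a, b) ∧ a + b = x ∧
        (∀ i : Nat, l ≤ (i : Int) → i < t.length → a ≤ t.getD i 0) ∧
        (∀ j : Nat, (j : Int) ≤ r → j < t.length → t.getD j 0 ≤ b)) →
    aLoop x t l r best = match pvLp x t.reverse with
      | some (a, b) => "yes " ++ PySem.Int.toStr a ++ " " ++ PySem.Int.toStr b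
      | none => "danger" := by
  intro fuel
  induction fuel with
  | zero =>
    intro l r best hf h0 h1 h2 h3 hn hsome
    have hlr : ¬ l < r := by omega
    rw [aLoop.eq_def]; simp only [dif_neg hlr]
    cases best with
    | none =>
      rw [lp_eq_none x t (fun i j hij hj hx => by
        have := hn rfl i j hij hj hx; omega)]
    | some ab =>
      obtain ⟨a, b⟩ := ab
      rw [(hsome a b rfl).1]
  | succ k ih =>
    intro l r best hf h0 h1 h2 h3 hn hsome
    by_cases hlr : l < r
    case neg =>
      rw [aLoop.eq_def]; simp only [dif_neg hlr]
      cases best with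
      | none =>
        rw [lp_eq_none x t (fun i j hij hj hx => by
          have := hn rfl i j hij hj hx; omega)]
      | some ab =>
        obtain ⟨a, b⟩ := ab
        rw [(hsome a b rfl).1]
    case pos =>
      have hln : l.toNat < t.length := by omega
      have hrn : r.toNat < t.length := by omega
      have hga := pyGet?_toNat t l h0 hln
      have hgb := pyGet?_toNat t r h2 hrn
      set a := t.getD l.toNat 0 with ha
      set b := t.getD r.toNat 0 with hb
      have hab : a ≤ b := sorted_getD_mono t hs l.toNat r.toNat (by omega) hrn
      rw [aLoop.eq_def]; simp only [dif_pos hlr, hga, hgb]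
      by_cases hx : a + b = x
      · simp only [if_pos hx]
        cases best with
        | none =>
          have hlast : ∀ j, r.toNat < j → j < t.length → ∀ i, i < j →
              t.getD i 0 + t.getD j 0 ≠ x := by
            intro j hrj hj i hij hsum
            have := hn rfl i j hij hj hsum
            omega
          have hlp : pvLp x t.reverse = some (a, b) := by
            have := lp_eq_some_of_last x t r.toNat hrn ⟨l.toNat, by omega, hx⟩ hlast
            rw [this, ← hb]
            have : x - b = a := by omega
            rw [this]
          refine ih (l + 1) (r - 1) (some (a, b)) (by omega) (by omega) (by omega)
            (by omega) (by omega) (by intro hcon; exact absurd hcon (by simp)) ?_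
          intro a' b' heq
          rw [Option.some.injEq, Prod.mk.injEq] at heq
          obtain ⟨hea, heb⟩ := heq
          subst hea; subst heb
          exact ⟨hlp, hx, fun i hi hil => sorted_getD_mono t hs l.toNat i (by omega) hil,
            fun j hj hjl => sorted_getD_mono t hs j r.toNat (by omega) hrn⟩
        | some pq =>
          obtain ⟨p, q⟩ := pq
          obtain ⟨hlp, hpq, hpl, hqr⟩ := hsome p q rfl
          have hpa : p ≤ a := hpl l.toNat (by omega) hln
          have hbq : b ≤ q := hqr r.toNat (by omega) hrn
          have hiff : ¬ (|b - a| > |q - p|) := by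
            rw [abs_of_nonneg (by omega), abs_of_nonneg (by omega)]
            omega
          simp only [if_neg hiff]
          refine ih (l + 1) (r - 1) (some (p, q)) (by omega) (by omega) (by omega)
            (by omega) (by omega) (by intro hcon; exact absurd hcon (by simp)) ?_
          intro a' b' heq
          rw [Option.some.injEq, Prod.mk.injEq] at heq
          obtain ⟨hea, heb⟩ := heq
          subst hea; subst heb
          exact ⟨hlp, hpq, fun i hi hil => hpl i (by omega) hil,
            fun j hj hjl => hqr j (by omega) hjl⟩
      · by_cases hxlt : a + b < x
        · simp only [if_neg hx, if_pos hxlt]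
          refine ih (l + 1) r best (by omega) (by omega) (by omega) h2 h3 ?_ ?_
          · intro hbn i j hij hj hsum
            obtain ⟨hli, hjr⟩ := hn hbn i j hij hj hsum
            refine ⟨?_, hjr⟩
            by_cases hil : (i : Int) = l
            · exfalso
              have hia : t.getD i 0 = a := by rw [ha]; congr 1; omega
              have hjb : t.getD j 0 ≤ b :=
                sorted_getD_mono t hs j r.toNat (by omega) hrn
              omega
            · omega
          · intro a' b' heq
            obtain ⟨hlp, hpq, hpl, hqr⟩ := hsome a' b' heq
            exact ⟨hlp, hpq, fun i hi hil => hpl i (by omega) hil, hqr⟩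
        · simp only [if_neg hx, if_neg hxlt]
          refine ih l (r - 1) best (by omega) h0 h1 (by omega) (by omega) ?_ ?_
          · intro hbn i j hij hj hsum
            obtain ⟨hli, hjr⟩ := hn hbn i j hij hj hsum
            refine ⟨hli, ?_⟩
            by_cases hjl : (j : Int) = r
            · exfalso
              have hjb : t.getD j 0 = b := by rw [hb]; congr 1; omega
              have hia : a ≤ t.getD i 0 :=
                sorted_getD_mono t hs l.toNat i (by omega) (by omega)
              omega
            · omega
          · intro a' b' heq
            obtain ⟨hlp, hpq, hpl, hqr⟩ := hsome a' b' heq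
            exact ⟨hlp, hpq, hpl, fun j hj hjl => hqr j (by omega) hjl⟩

-- let-free view of find_lego_pair_alt (definitional)
def altBody (x : Int) (n : Int) (s : List Int) : String :=
  match ((PySem.List.pyRange 0 (min n (s.length : Int)) 1).foldl
      (fun st j => bStep x st (PySem.List.pyGetD s j 0))
      ((none : Option (Int × Int)), PySem.Set.empty)).1 with
  | some (a, b) => "yes " ++ PySem.Int.toStr a ++ " " ++ PySem.Int.toStr b
  | none => "danger"

lemma alt_eq_body (x : Int) (n : Int) (pieces : List Int) :
    find_lego_pair_alt x n pieces
      = altBody x n (PySem.List.sorted pieces (fun v => v) false) := rfl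

-- B's whole computation equals the pvLp description of the sorted prefix.
lemma alt_eq_lp (x : Int) (n : Int) (pieces : List Int) (hn2 : 2 ≤ n)
    (hnl : n ≤ (pieces.length : Int)) :
    find_lego_pair_alt x n pieces
      = match pvLp x ((PySem.List.sorted pieces (fun v => v) false).take n.toNat).reverse with
        | some (a, b) => "yes " ++ PySem.Int.toStr a ++ " " ++ PySem.Int.toStr b
        | none => "danger" := by
  rw [alt_eq_body]
  set s := PySem.List.sorted pieces (fun v => v) false with hsdef
  have hlen : s.length = pieces.length := PySem.List.length_sorted ..
  have hmin : min n (s.length : Int) = ((n.toNat : Nat) : Int) := by omega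
  unfold altBody
  rw [hmin, fold_range_take x s n.toNat (by omega)]
  have hinit : ((none : Option (Int × Int)), PySem.Set.empty)
      = (pvLp x ([] : List Int).reverse, PySem.Set.ofList ([] : List Int)) := rfl
  rw [hinit, bfold_spec x (s.take n.toNat) []]
  simp

-- ===== VERDICT (by name: the statement is the Claim_ definition above) =====
theorem find_lego_pair_spec : Claim_equal_find_lego_pair := by
  intro x n pieces _hdom hpre
  unfold Spec_find_lego_pair
  by_cases h2n : 2 ≤ n
  case neg =>
    -- n < 2: A's loop never runs; B scans at most one element — both "danger"
    have hA : find_lego_pair x n pieces = "danger" := by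
      unfold find_lego_pair
      rw [aLoop.eq_def]
      simp only [dif_neg (show ¬ (0 : Int) < n - 1 by omega)]
    have hB : find_lego_pair_alt x n pieces = "danger" := by
      rw [alt_eq_body]
      set s := PySem.List.sorted pieces (fun v => v) false with hsdef
      unfold altBody
      by_cases hm : min n (s.length : Int) ≤ 0
      · rw [PySem.List.pyRange_one_eq_nil hm]
        rfl
      · have hm1 : min n (s.length : Int) = 1 := by omega
        rw [hm1, show PySem.List.pyRange 0 1 1 = [0] from rfl]
        simp [bStep, PySem.Set.contains, PySem.Set.empty]
    rw [hA, hB]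
  case pos =>
    have hnl : n ≤ (pieces.length : Int) := by
      unfold Pre_find_lego_pair at hpre; omega
    set s := PySem.List.sorted pieces (fun v => v) false with hsdef
    have hlen : s.length = pieces.length := PySem.List.length_sorted ..
    set t := s.take n.toNat with htdef
    have htlen : t.length = n.toNat := by
      rw [htdef, List.length_take]; omega
    have hts : t.Pairwise (· ≤ ·) := by
      have := PySem.List.sorted_pairwise (xs := pieces) (key := fun v => v)
      exact List.Pairwise.sublist (List.take_sublist _ _) (by simpa using this)
    have hA : find_lego_pair x n pieces
        = match pvLp x t.reverse with
          | some (a, b) => "yes " ++ PySem.Int.toStr a ++ " " ++ PySem.Int.toStr b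
          | none => "danger" := by
      unfold find_lego_pair
      rw [← hsdef, aLoop_take x s n.toNat (by omega) (n - 1).toNat 0 (n - 1) none
        (by omega) (by omega) (by omega), ← htdef]
      exact aLoop_main x t hts (n - 1).toNat 0 (n - 1) none (by omega) (by omega)
        (by omega) (by omega) (by omega)
        (fun _ i j hij hj _ => by omega)
        (fun a b h => by exact absurd h (by simp))
    rw [hA, alt_eq_lp x n pieces h2n hnl, ← hsdef, ← htdef]
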